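-- pv_equiv track=rewrite | github.com/itzhak-iab/Q5-Matrix | backend/macro_agent.py | _extract_all_objects
-- ===== SOURCE A (Python) =====
-- from typing import Any, Optional, Tuple, Dict, List
--
-- def _find_matching_bracket(text: str, start: int, open_ch: str, close_ch: str) -> int:
--     """Find the matching closing bracket."""
--     depth = 0
--     in_string = False
--     escape_next = False
--     for i in range(start, len(text)):
--         c = text[i]
--         if escape_next:
--             escape_next = False
--             continue
--         if c == "\\":
--             escape_next = True
--             continue
--         if c == '"':
--             in_string = not in_string
--             continue
--         if in_string:
--             continue
--         if c == open_ch: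
--             depth += 1
--         elif c == close_ch:
--             depth -= 1
--             if depth == 0:
--                 return i
--     return -1
--
-- def _extract_all_objects(text: str) -> List[str]:
--     """Extract all top-level {...} objects from text."""
--     objects = []
--     i = 0
--     while i < len(text):
--         if text[i] == "{":
--             end = _find_matching_bracket(text, i, "{", "}")
--             if end > i:
--                 objects.append(text[i:end + 1])
--                 i = end + 1
--                 continue
--         i += 1
--     return objects
-- ===== SOURCE B (Python) =====
-- def _extract_all_objects(text):
--     """Extract all top-level {...} objects from text (single forward pass).
--
--     One scanner tracks depth / string / escape state; when an opening brace
--     turns out to be unmatched at end of input, scanning resumes just past it.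
--     """
--     objects = []
--     n = len(text)
--     i = 0
--     start = 0          # opening index of the object being scanned (unused at depth 0)
--     depth = 0
--     in_string = False
--     escape = False
--     while i < n:
--         c = text[i]
--         if depth == 0:
--             if c == "{":
--                 start = i
--                 depth = 1
--                 in_string = False
--                 escape = False
--         else:
--             if escape:
--                 escape = False
--             elif c == "\\":
--                 escape = True
--             elif c == '"':
--                 in_string = not in_string
--             elif not in_string:
--                 if c == "{":
--                     depth += 1
--                 elif c == "}":
--                     depth -= 1
--                     if depth == 0:
--                         objects.append(text[start:i + 1])
--         i += 1
--         if depth > 0 and i >= n: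
--             # the object opened at `start` never closes: resume right after it
--             start += 1
--             i = start
--             depth = 0
--     return objects
-- ===== Notes on version B (the rewrite author's own statement) =====
-- stated objective: alternative
-- what changed: A scans for each '{' with a separate matcher helper that rescans the text and then slices; B is a single forward state machine carrying depth/string/escape state itself, emitting each object as its closing brace is reached and resuming just past an opening brace that turns out to be unmatched.
import Mathlib
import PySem

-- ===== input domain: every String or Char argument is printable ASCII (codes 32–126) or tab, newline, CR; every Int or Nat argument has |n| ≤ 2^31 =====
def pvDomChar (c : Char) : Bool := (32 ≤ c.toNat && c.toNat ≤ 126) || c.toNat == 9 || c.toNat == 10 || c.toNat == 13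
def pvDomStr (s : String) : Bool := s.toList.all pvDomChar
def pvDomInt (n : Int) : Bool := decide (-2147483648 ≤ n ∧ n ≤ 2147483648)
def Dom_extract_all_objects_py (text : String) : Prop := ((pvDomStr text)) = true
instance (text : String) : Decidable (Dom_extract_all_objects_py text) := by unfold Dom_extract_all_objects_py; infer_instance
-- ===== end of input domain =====

-- B replaces A's per-brace helper rescans by one forward scanner that carries the
-- depth/string/escape state itself and, when an opening brace never closes, resumes
-- just past it (objective: alternative single-pass decomposition, same results).

-- ===== PORT A =====
-- termination helpers (cited by name in the decreasing_by blocks below)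
theorem pvLoopDecJump (n i : Nat) (e : Int) (h : i < n) (hlt : (i : Int) < e) :
    n - (e.toNat + 1) < n - i := by omega

theorem pvScanDecCore (a b x y n : Nat)
    (h : a < b ∧ x ≤ n ∨ a = b ∧ x < y) : a * (n+1) + x < b * (n+1) + y := by
  rcases h with ⟨h1, h2⟩ | ⟨h1, h2⟩
  · calc a * (n+1) + x < a * (n+1) + (n+1) := by omega
      _ = (a+1) * (n+1) := by ring
      _ ≤ b * (n+1) := Nat.mul_le_mul_right _ h1
      _ ≤ b * (n+1) + y := by omega
  · subst h1
    exact Nat.add_lt_add_left h2 _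

theorem pvScanDec1 (n s i : Nat) (h : i < n) :
    (n - min s (i+1)) * (n+1) + (n - (i+1)) < (n - min s i) * (n+1) + (n - i) :=
  pvScanDecCore _ _ _ _ _ (by omega)

theorem pvScanDec2 (n s i : Nat) (h : i < n) :
    (n - min i (i+1)) * (n+1) + (n - (i+1)) < (n - min s i) * (n+1) + (n - i) :=
  pvScanDecCore _ _ _ _ _ (by omega)

theorem pvScanDec3 (n s i : Nat) (h : i < n) :
    (n - min (s+1) (s+1)) * (n+1) + (n - (s+1)) < (n - min s i) * (n+1) + (n - i) :=
  pvScanDecCore _ _ _ _ _ (by omega)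

theorem pvScanDec4 (n s i : Nat) (h : i < n) :
    (n - min (i+1) (i+1)) * (n+1) + (n - (i+1)) < (n - min s i) * (n+1) + (n - i) :=
  pvScanDecCore _ _ _ _ _ (by omega)

-- the `for i in range(start, len(text))` loop of _find_matching_bracket
def pvFindAux (cs : List Char) (i : Nat) (depth : Int) (in_string escape_next : Bool)
    (open_ch close_ch : Char) : Int :=
  if h : i < cs.length then
    if escape_next then pvFindAux cs (i+1) depth in_string false open_ch close_ch
    else if cs[i] = '\\' then pvFindAux cs (i+1) depth in_string true open_ch close_ch
    else if cs[i] = '"' then pvFindAux cs (i+1) depth (!in_string) escape_next open_ch close_ch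
    else if in_string then pvFindAux cs (i+1) depth in_string escape_next open_ch close_ch
    else if cs[i] = open_ch then pvFindAux cs (i+1) (depth+1) in_string escape_next open_ch close_ch
    else if cs[i] = close_ch then
      if depth - 1 = 0 then (i : Int)
      else pvFindAux cs (i+1) (depth-1) in_string escape_next open_ch close_ch
    else pvFindAux cs (i+1) depth in_string escape_next open_ch close_ch
  else -1
termination_by cs.length - i
decreasing_by all_goals exact Nat.sub_succ_lt_self _ _ h

def find_matching_bracket_py (cs : List Char) (start : Nat) (open_ch close_ch : Char) : Int :=
  pvFindAux cs start 0 false false open_ch close_ch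

-- the `while i < len(text)` loop of _extract_all_objects
def pvLoopA (cs : List Char) (i : Nat) : List String :=
  if h : i < cs.length then
    if cs[i] = '{' then
      let e := find_matching_bracket_py cs i '{' '}'
      if hlt : (i : Int) < e then
        String.ofList (PySem.List.slice cs (some (i : Int)) (some (e + 1))) :: pvLoopA cs (e.toNat + 1)
      else pvLoopA cs (i+1)
    else pvLoopA cs (i+1)
  else []
termination_by cs.length - i
decreasing_by
  · exact pvLoopDecJump cs.length i _ h hlt
  · exact Nat.sub_succ_lt_self _ _ h
  · exact Nat.sub_succ_lt_self _ _ h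

def extract_all_objects_py (text : String) : List String := pvLoopA text.toList 0

-- ===== PORT B =====
-- B's single while-loop: state = position i, opening index `start` of the object in
-- progress, depth, string/escape flags; each branch ends with the `i += 1` step plus
-- python's `if depth > 0 and i >= n: start += 1; i = start; depth = 0` restart check.
def pvScanB (cs : List Char) (i start : Nat) (depth : Int) (in_string escape : Bool) : List String :=
  if h : i < cs.length then
    if depth = 0 then
      if cs[i] = '{' then
        -- depth becomes 1, so the restart test is just `i + 1 >= n`
        if cs.length ≤ i + 1 then pvScanB cs (i+1) (i+1) 0 false false
        else pvScanB cs (i+1) i 1 false false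
      else pvScanB cs (i+1) start 0 in_string escape
    else if escape then
      if 0 < depth ∧ cs.length ≤ i + 1 then pvScanB cs (start+1) (start+1) 0 in_string false
      else pvScanB cs (i+1) start depth in_string false
    else if cs[i] = '\\' then
      if 0 < depth ∧ cs.length ≤ i + 1 then pvScanB cs (start+1) (start+1) 0 in_string true
      else pvScanB cs (i+1) start depth in_string true
    else if cs[i] = '"' then
      if 0 < depth ∧ cs.length ≤ i + 1 then pvScanB cs (start+1) (start+1) 0 (!in_string) escape
      else pvScanB cs (i+1) start depth (!in_string) escape
    else if in_string then
      if 0 < depth ∧ cs.length ≤ i + 1 then pvScanB cs (start+1) (start+1) 0 in_string escape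
      else pvScanB cs (i+1) start depth in_string escape
    else if cs[i] = '{' then
      if 0 < depth + 1 ∧ cs.length ≤ i + 1 then pvScanB cs (start+1) (start+1) 0 in_string escape
      else pvScanB cs (i+1) start (depth+1) in_string escape
    else if cs[i] = '}' then
      if depth - 1 = 0 then
        String.ofList ((cs.drop start).take (i + 1 - start)) :: pvScanB cs (i+1) start 0 in_string escape
      else
        if 0 < depth - 1 ∧ cs.length ≤ i + 1 then pvScanB cs (start+1) (start+1) 0 in_string escape
        else pvScanB cs (i+1) start (depth-1) in_string escape
    else
      if 0 < depth ∧ cs.length ≤ i + 1 then pvScanB cs (start+1) (start+1) 0 in_string escape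
      else pvScanB cs (i+1) start depth in_string escape
  else []
termination_by (cs.length - min start i) * (cs.length + 1) + (cs.length - i)
decreasing_by all_goals
  first
  | exact pvScanDec1 cs.length start i h
  | exact pvScanDec2 cs.length start i h
  | exact pvScanDec3 cs.length start i h
  | exact pvScanDec4 cs.length start i h

def extract_all_objects_py_alt (text : String) : List String :=
  pvScanB text.toList 0 0 0 false false

-- ===== PRECONDITION & SPEC =====
def Spec_extract_all_objects_py (text : String) (out : List String) : Prop := out = extract_all_objects_py_alt text
instance (text : String) (out : List String) : Decidable (Spec_extract_all_objects_py text out) := by unfold Spec_extract_all_objects_py; infer_instance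

-- ===== CLAIM (what is proved, stated in full; the proofs are below) =====
def Claim_equal_extract_all_objects_py : Prop := ∀ (text : String), Dom_extract_all_objects_py text → Spec_extract_all_objects_py text (extract_all_objects_py text)

-- ===== LEMMAS AND PROOFS =====

-- At depth 0 the scanner ignores `start` and both flags.
theorem pvScanB_depth0_indep (cs : List Char) :
    ∀ k i s s' a a' b b', cs.length - i ≤ k →
      pvScanB cs i s 0 a b = pvScanB cs i s' 0 a' b' := by
  intro k
  induction k with
  | zero =>
    intro i s s' a a' b b' hk
    have h : ¬ i < cs.length := by omega
    conv_lhs => rw [pvScanB.eq_def]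
    conv_rhs => rw [pvScanB.eq_def]
    simp only [dif_neg h]
  | succ k ih =>
    intro i s s' a a' b b' hk
    by_cases h : i < cs.length
    · conv_lhs => rw [pvScanB.eq_def]
      conv_rhs => rw [pvScanB.eq_def]
      simp only [dif_pos h]
      by_cases hc : cs[i] = '{'
      · simp only [hc, reduceIte]
      · simp only [if_neg hc]
        exact ih (i+1) s s' a a' b b' (by omega)
    · conv_lhs => rw [pvScanB.eq_def]
      conv_rhs => rw [pvScanB.eq_def]
      simp only [dif_neg h]

theorem pvScanB_d0 (cs : List Char) (i s s' : Nat) (a a' b b' : Bool) :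
    pvScanB cs i s 0 a b = pvScanB cs i s' 0 a' b' :=
  pvScanB_depth0_indep cs cs.length i s s' a a' b b' (by omega)

-- A's matcher either fails or returns an index in [i, length).
theorem pvFindAux_range (cs : List Char) :
    ∀ k i d a b, cs.length - i ≤ k →
      pvFindAux cs i d a b '{' '}' = -1 ∨
        ((i : Int) ≤ pvFindAux cs i d a b '{' '}' ∧
          pvFindAux cs i d a b '{' '}' < (cs.length : Int)) := by
  intro k
  induction k with
  | zero =>
    intro i d a b hk
    rw [pvFindAux.eq_def, dif_neg (by omega : ¬ i < cs.length)]
    exact Or.inl rfl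
  | succ k ih =>
    intro i d a b hk
    by_cases h : i < cs.length
    · have step : ∀ {e : Int},
          (e = -1 ∨ ((i + 1 : Nat) : Int) ≤ e ∧ e < (cs.length : Int)) →
          (e = -1 ∨ (i : Int) ≤ e ∧ e < (cs.length : Int)) := by
        intro e hr
        rcases hr with hr | hr
        · exact Or.inl hr
        · refine Or.inr ⟨?_, hr.2⟩
          have := hr.1; push_cast at this ⊢; omega
      rw [pvFindAux.eq_def]
      simp only [dif_pos h]
      split_ifs with h1 h2 h3 h4 h5 h6 h7
      · exact step (ih (i+1) _ _ _ (by omega))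
      · exact step (ih (i+1) _ _ _ (by omega))
      · exact step (ih (i+1) _ _ _ (by omega))
      · exact step (ih (i+1) _ _ _ (by omega))
      · exact step (ih (i+1) _ _ _ (by omega))
      · exact Or.inr ⟨le_refl _, by exact_mod_cast h⟩
      · exact step (ih (i+1) _ _ _ (by omega))
      · exact step (ih (i+1) _ _ _ (by omega))
    · rw [pvFindAux.eq_def, dif_neg h]
      exact Or.inl rfl

-- what B's scanner does from a mid-scan state, phrased through A's matcher result
def pvSpec (cs : List Char) (s : Nat) (e : Int) : List String :=
  if e < 0 then pvScanB cs (s+1) (s+1) 0 false false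
  else String.ofList ((cs.drop s).take (e.toNat + 1 - s)) ::
         pvScanB cs (e.toNat + 1) (e.toNat + 1) 0 false false

-- A scan in progress (depth > 0) behaves exactly like A's matcher from the same state.
theorem pvScanB_scan_eq (cs : List Char) :
    ∀ k i s d a b, cs.length - i ≤ k → i < cs.length → 0 < d →
      pvScanB cs i s d a b = pvSpec cs s (pvFindAux cs i d a b '{' '}') := by
  intro k
  induction k with
  | zero => intro i s d a b hk h hd; omega
  | succ k ih =>
    intro i s d a b hk h hd
    have hne : ¬ (d = 0) := by omega
    have step : ∀ (d' : Int) (a' b' : Bool), 0 < d' →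
        (if 0 < d' ∧ cs.length ≤ i + 1 then pvScanB cs (s+1) (s+1) 0 a' b'
         else pvScanB cs (i+1) s d' a' b')
          = pvSpec cs s (pvFindAux cs (i+1) d' a' b' '{' '}') := by
      intro d' a' b' hd'
      by_cases hn : cs.length ≤ i + 1
      · rw [if_pos ⟨hd', hn⟩]
        have hF : pvFindAux cs (i+1) d' a' b' '{' '}' = -1 := by
          rw [pvFindAux.eq_def, dif_neg (by omega : ¬ i + 1 < cs.length)]
        rw [hF]
        simp only [pvSpec]
        rw [if_pos (by decide : (-1 : Int) < 0)]
        exact pvScanB_d0 cs (s+1) (s+1) (s+1) a' false b' false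
      · rw [if_neg (fun hh => hn hh.2)]
        exact ih (i+1) s d' a' b' (by omega) (by omega) hd'
    conv_lhs => rw [pvScanB.eq_def]
    simp only [dif_pos h, if_neg hne]
    rw [pvFindAux.eq_def]
    simp only [dif_pos h]
    by_cases hb : b = true
    · simp only [if_pos hb]
      exact step d a false hd
    · simp only [if_neg hb]
      by_cases h1 : cs[i] = '\\'
      · simp only [if_pos h1]
        exact step d a true hd
      · simp only [if_neg h1]
        by_cases h2 : cs[i] = '"'
        · simp only [if_pos h2]
          exact step d (!a) b hd
        · simp only [if_neg h2]
          by_cases ha : a = true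
          · simp only [if_pos ha]
            exact step d a b hd
          · simp only [if_neg ha]
            by_cases h3 : cs[i] = '{'
            · simp only [if_pos h3]
              exact step (d+1) a b (by omega)
            · simp only [if_neg h3]
              by_cases h4 : cs[i] = '}'
              · simp only [if_pos h4]
                by_cases h5 : d - 1 = 0
                · simp only [if_pos h5]
                  simp only [pvSpec]
                  rw [if_neg (by omega : ¬ ((i : Nat) : Int) < 0)]
                  simp only [Int.toNat_natCast]
                  congr 1
                  exact pvScanB_d0 cs (i+1) s (i+1) a false b false
                · simp only [if_neg h5]
                  exact step (d-1) a b (by omega)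
              · simp only [if_neg h4]
                exact step d a b hd

theorem pvLoopA_eq_pvScanB (cs : List Char) :
    ∀ k i, cs.length - i ≤ k → pvLoopA cs i = pvScanB cs i i 0 false false := by
  intro k
  induction k with
  | zero =>
    intro i hk
    rw [pvLoopA.eq_def, dif_neg (by omega : ¬ i < cs.length)]
    rw [pvScanB.eq_def, dif_neg (by omega : ¬ i < cs.length)]
  | succ k ih =>
    intro i hk
    by_cases h : i < cs.length
    · conv_lhs => rw [pvLoopA.eq_def]
      conv_rhs => rw [pvScanB.eq_def]
      simp only [dif_pos h]
      by_cases hc : cs[i] = '{'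
      · simp only [hc, reduceIte, find_matching_bracket_py]
        rw [pvFindAux.eq_def]
        simp only [dif_pos h, hc, zero_add,
          show (false = true) = False from by simp, if_false,
          show ('{' = '\\') = False from by decide,
          show ('{' = '"') = False from by decide, if_true]
        by_cases hn : cs.length ≤ i + 1
        · have hF : pvFindAux cs (i+1) 1 false false '{' '}' = -1 := by
            rw [pvFindAux.eq_def, dif_neg (by omega : ¬ i + 1 < cs.length)]
          rw [hF, dif_neg (by omega : ¬ (i : Int) < -1), if_pos hn]
          exact ih (i+1) (by omega)
        · rw [if_neg hn]
          rw [pvScanB_scan_eq cs cs.length (i+1) i 1 false false (by omega) (by omega) (by decide)]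
          rcases pvFindAux_range cs cs.length (i+1) 1 false false (by omega) with hr | hr
          · rw [hr, dif_neg (by omega : ¬ (i : Int) < -1)]
            simp only [pvSpec]
            rw [if_pos (by decide : (-1 : Int) < 0)]
            exact ih (i+1) (by omega)
          · have hip : ((i : Nat) : Int) + 1 ≤ pvFindAux cs (i+1) 1 false false '{' '}' := by
              have := hr.1; push_cast at this ⊢; omega
            have hlt : (i : Int) < pvFindAux cs (i+1) 1 false false '{' '}' := by omega
            have hln : pvFindAux cs (i+1) 1 false false '{' '}' < (cs.length : Int) := hr.2
            rw [dif_pos hlt]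
            simp only [pvSpec]
            rw [if_neg (by omega : ¬ pvFindAux cs (i+1) 1 false false '{' '}' < 0)]
            have he : ((pvFindAux cs (i+1) 1 false false '{' '}').toNat : Int)
                = pvFindAux cs (i+1) 1 false false '{' '}' :=
              Int.toNat_of_nonneg (by omega)
            have he2 : ((pvFindAux cs (i+1) 1 false false '{' '}' + 1).toNat : Int)
                = pvFindAux cs (i+1) 1 false false '{' '}' + 1 :=
              Int.toNat_of_nonneg (by omega)
            congr 1
            · rw [PySem.List.slice_toNat cs (by omega) (by omega)]
              simp only [Int.toNat_natCast]
              congr 2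
              omega
            · exact ih ((pvFindAux cs (i+1) 1 false false '{' '}').toNat + 1) (by omega)
      · simp only [if_neg hc]
        rw [pvScanB_d0 cs (i+1) i (i+1) false false false false]
        exact ih (i+1) (by omega)
    · rw [pvLoopA.eq_def, dif_neg h]
      rw [pvScanB.eq_def, dif_neg h]

-- ===== VERDICT (by name: the statement is the Claim_ definition above) =====
theorem extract_all_objects_py_spec : Claim_equal_extract_all_objects_py := by
  intro text _
  unfold Spec_extract_all_objects_py extract_all_objects_py extract_all_objects_py_alt
  exact pvLoopA_eq_pvScanB text.toList text.toList.length 0 (by omega)
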